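-- pv_equiv track=rewrite | github.com/Shankar7318/SQL-CODER | backend/services/sql_generator.py | _classify_column
-- ===== SOURCE A (Python) =====
-- def _classify_column(column_name: str, column_type: str) -> str:
--     """Classify column purpose based on name and type"""
--     name = column_name.lower()
--
--     # ID columns
--     if name == 'id' or name.endswith('_id'):
--         return "identifier"
--
--     # Name columns
--     if any(word in name for word in ['name', 'first_name', 'last_name']):
--         return "name"
--
--     # Date columns
--     if any(word in name for word in ['date', 'time', 'created', 'updated']):
--         return "date"
--
--     # Status/Type columns
--     if any(word in name for word in ['status', 'type', 'category']):
--         return "category"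
--
--     # Metric columns
--     if any(t in column_type for t in ['int', 'decimal', 'numeric']):
--         if any(word in name for word in ['price', 'cost', 'amount', 'salary', 'wage']):
--             return "metric"
--         return "number"
--
--     return "attribute"
-- ===== SOURCE B (Python) =====
-- # One flat keyword->label table scanned in a single pass collecting ALL matched
-- # labels into a set, then a fixed priority selection picks the answer.
-- KEYWORDS = [
--     ('name', 'name'), ('first_name', 'name'), ('last_name', 'name'),
--     ('date', 'date'), ('time', 'date'), ('created', 'date'), ('updated', 'date'),
--     ('status', 'category'), ('type', 'category'), ('category', 'category'),
--     ('price', 'money'), ('cost', 'money'), ('amount', 'money'),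
--     ('salary', 'money'), ('wage', 'money'),
-- ]
-- PRIORITY = ('name', 'date', 'category')
-- NUMERIC_TYPES = ('int', 'decimal', 'numeric')
--
--
-- def _classify_column(column_name: str, column_type: str) -> str:
--     """Classify column purpose based on name and type"""
--     name = column_name.lower()
--
--     if name == 'id' or name.endswith('_id'):
--         return "identifier"
--
--     hits = {label for kw, label in KEYWORDS if kw in name}
--
--     for label in PRIORITY:
--         if label in hits:
--             return label
--
--     if any(t in column_type for t in NUMERIC_TYPES):
--         return "metric" if 'money' in hits else "number"
--
--     return "attribute"
-- ===== Notes on version B (the rewrite author's own statement) =====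
-- stated objective: alternative
-- what changed: Replaces the ordered chain of per-category any() substring branches by a single pass over one flat keyword->label table that collects the set of all matched labels, then a fixed priority list (and the numeric-type gate using the collected 'money' label) selects the answer.
import Mathlib
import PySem

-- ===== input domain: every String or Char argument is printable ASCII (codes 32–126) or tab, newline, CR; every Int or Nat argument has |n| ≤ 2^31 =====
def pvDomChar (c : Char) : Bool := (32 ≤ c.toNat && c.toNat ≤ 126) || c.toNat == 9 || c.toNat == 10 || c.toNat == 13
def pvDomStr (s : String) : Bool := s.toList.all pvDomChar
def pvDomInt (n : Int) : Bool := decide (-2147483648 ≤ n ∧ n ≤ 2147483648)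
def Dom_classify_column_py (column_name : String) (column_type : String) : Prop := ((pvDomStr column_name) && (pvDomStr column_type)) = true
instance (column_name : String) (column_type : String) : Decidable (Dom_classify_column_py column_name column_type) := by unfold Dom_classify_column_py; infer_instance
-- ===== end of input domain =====

-- B collects all matched labels from one flat keyword table in a single pass into a set, then selects by a fixed priority list (alternative decomposition, same cost).


-- ===== PORT A =====
def classify_column_py (column_name : String) (column_type : String) : String :=
  let name := PySem.Str.lower column_name
  if name == "id" || PySem.Str.endswith name "_id" then "identifier"
  else if ["name", "first_name", "last_name"].any (fun word => PySem.Str.isIn word name) then "name"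
  else if ["date", "time", "created", "updated"].any (fun word => PySem.Str.isIn word name) then "date"
  else if ["status", "type", "category"].any (fun word => PySem.Str.isIn word name) then "category"
  else if ["int", "decimal", "numeric"].any (fun t => PySem.Str.isIn t column_type) then
    if ["price", "cost", "amount", "salary", "wage"].any (fun word => PySem.Str.isIn word name) then "metric"
    else "number"
  else "attribute"

-- ===== PORT B =====
def pvKeywords : List (String × String) :=
  [("name", "name"), ("first_name", "name"), ("last_name", "name"),
   ("date", "date"), ("time", "date"), ("created", "date"), ("updated", "date"),
   ("status", "category"), ("type", "category"), ("category", "category"),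
   ("price", "money"), ("cost", "money"), ("amount", "money"),
   ("salary", "money"), ("wage", "money")]

def pvPriority : List String := ["name", "date", "category"]

def pvNumericTypes : List String := ["int", "decimal", "numeric"]

-- {label for kw, label in KEYWORDS if kw in name}
def pvHits (name : String) : PySem.Set String :=
  PySem.Set.ofList ((pvKeywords.filter (fun p => PySem.Str.isIn p.1 name)).map Prod.snd)

-- the 'for label in PRIORITY' loop: first label of the priority list present in hits
def pvFirstHit (hits : PySem.Set String) : List String → Option String
  | [] => none
  | l :: rest => if PySem.Set.contains hits l then some l else pvFirstHit hits rest

def classify_column_py_alt (column_name : String) (column_type : String) : String :=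
  let name := PySem.Str.lower column_name
  if name == "id" || PySem.Str.endswith name "_id" then "identifier"
  else
    let hits := pvHits name
    match pvFirstHit hits pvPriority with
    | some label => label
    | none =>
        if pvNumericTypes.any (fun t => PySem.Str.isIn t column_type) then
          if PySem.Set.contains hits "money" then "metric" else "number"
        else "attribute"

-- ===== PRECONDITION & SPEC =====
def Spec_classify_column_py (column_name : String) (column_type : String) (out : String) : Prop := out = classify_column_py_alt column_name column_type
instance (column_name : String) (column_type : String) (out : String) : Decidable (Spec_classify_column_py column_name column_type out) := by unfold Spec_classify_column_py; infer_instance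

-- ===== CLAIM (what is proved, stated in full; the proofs are below) =====
def Claim_equal_classify_column_py : Prop := ∀ (column_name : String) (column_type : String), Dom_classify_column_py column_name column_type → Spec_classify_column_py column_name column_type (classify_column_py column_name column_type)

-- ===== LEMMAS AND PROOFS =====

-- membership of a label in the collected hits set, as an any() over the flat table
theorem contains_hits (name l : String) :
    PySem.Set.contains (pvHits name) l =
      pvKeywords.any (fun p => PySem.Str.isIn p.1 name && p.2 == l) := by
  simp only [pvHits, PySem.Set.contains]
  rw [Bool.eq_iff_iff]
  simp [PySem.Set.mem_ofList, List.mem_map, List.mem_filter, List.any_eq_true]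

-- the four labels, specialised: each equals the corresponding any() of A
theorem hits_name (name : String) :
    PySem.Set.contains (pvHits name) "name" =
      ["name", "first_name", "last_name"].any (fun word => PySem.Str.isIn word name) := by
  rw [contains_hits]; simp [pvKeywords]

theorem hits_date (name : String) :
    PySem.Set.contains (pvHits name) "date" =
      ["date", "time", "created", "updated"].any (fun word => PySem.Str.isIn word name) := by
  rw [contains_hits]; simp [pvKeywords]

theorem hits_cat (name : String) :
    PySem.Set.contains (pvHits name) "category" =
      ["status", "type", "category"].any (fun word => PySem.Str.isIn word name) := by
  rw [contains_hits]; simp [pvKeywords]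

theorem hits_money (name : String) :
    PySem.Set.contains (pvHits name) "money" =
      ["price", "cost", "amount", "salary", "wage"].any (fun word => PySem.Str.isIn word name) := by
  rw [contains_hits]; simp [pvKeywords]

-- ===== VERDICT (by name: the statement is the Claim_ definition above) =====
theorem classify_column_py_spec : Claim_equal_classify_column_py := by
  intro column_name column_type _
  unfold Spec_classify_column_py classify_column_py classify_column_py_alt
  simp only [pvPriority, pvNumericTypes, pvFirstHit, hits_name, hits_date, hits_cat, hits_money]
  split_ifs <;> simp_all
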